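-- pv_equiv track=rewrite | github.com/amrits1990/PitchBookAutomation | TranscriptRAG/transcript_chunk_generator.py | _group_qa_segments
-- ===== SOURCE A (Python) =====
-- from typing import Dict, List
--
-- def _group_qa_segments(segments: List[Dict[str, str]]) -> List[List[Dict[str, str]]]:
--     """
--     Group segments into Q&A pairs: analyst question + all responses until next analyst
--
--     Args:
--         segments: List of speaker segments from Q&A section
--
--     Returns:
--         List of groups, where each group is [analyst_question, response1, response2, ...]
--     """
--     if not segments:
--         return []
--
--     qa_groups = []
--     current_group = []
--
--     for segment in segments:
--         speaker = segment['speaker']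
--         title = segment.get('title', '')
--
--         # Check if this is an analyst (new question starts)
--         if 'analyst' in title.lower():
--             # Save previous group if it exists
--             if current_group:
--                 qa_groups.append(current_group)
--
--             # Start new group with analyst question
--             current_group = [segment]
--         else:
--             # Add response to current group
--             if current_group:
--                 current_group.append(segment)
--             else:
--                 # Edge case: response without preceding analyst question
--                 current_group = [segment]
--
--     # Add final group
--     if current_group:
--         qa_groups.append(current_group)
--
--     return qa_groups
-- ===== SOURCE B (Python) =====
-- def _group_qa_segments(segments):
--     """Group Q&A segments into [analyst_question, response, ...] lists.
--
--     Walks the transcript in reverse, buffering responses until the analyst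
--     segment that leads them appears; a leading run of responses with no
--     analyst before it becomes a group of its own. Each segment is a record
--     with a mandatory 'speaker' and an optional 'title'.
--     """
--     groups = []
--     pending = []
--     for seg in reversed(segments):
--         speaker, title = seg['speaker'], seg.get('title', '')
--         if 'analyst' in title.lower():
--             groups.insert(0, [seg] + pending)
--             pending = []
--         else:
--             pending.insert(0, seg)
--     return ([pending] if pending else []) + groups
-- ===== Notes on version B (the rewrite author's own statement) =====
-- stated objective: alternative
-- what changed: Replaces A's forward scan with mutable qa_groups/current_group accumulator state by a reverse traversal that buffers non-analyst segments in a pending list until their leading analyst segment appears, prepending completed groups back-to-front; Pre_ excludes the inputs where a segment lacks the 'speaker' field, on which both programs raise KeyError.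
import Mathlib
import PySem

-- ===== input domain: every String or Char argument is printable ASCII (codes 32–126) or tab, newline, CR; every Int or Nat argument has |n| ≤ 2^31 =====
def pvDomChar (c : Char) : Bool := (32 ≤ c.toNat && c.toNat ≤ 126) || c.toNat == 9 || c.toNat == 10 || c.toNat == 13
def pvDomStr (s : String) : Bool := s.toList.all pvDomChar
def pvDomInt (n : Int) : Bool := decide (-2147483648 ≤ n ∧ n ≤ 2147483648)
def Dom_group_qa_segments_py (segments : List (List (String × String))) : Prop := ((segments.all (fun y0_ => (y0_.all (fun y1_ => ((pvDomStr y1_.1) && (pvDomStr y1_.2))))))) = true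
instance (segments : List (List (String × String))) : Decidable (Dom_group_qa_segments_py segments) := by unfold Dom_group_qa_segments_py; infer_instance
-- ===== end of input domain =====

-- B groups Q&A segments by a reverse traversal with a pending buffer instead of A's forward
-- accumulator fold; same cost, different decomposition. Both read the mandatory 'speaker'
-- field of every segment; Pre_ excludes the inputs where it is missing (both raise KeyError).

-- 'analyst' in title.lower()  with title = seg.get('title','')
def pvIsAnalyst (seg : List (String × String)) : Bool :=
  PySem.Str.isIn "analyst" (PySem.Str.lower ((PySem.Dict.mk seg).getD "title" ""))

-- ===== PORT A =====
-- one iteration of A's for-loop over the state (qa_groups, current_group)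
def pvStepA (st : List (List (List (String × String))) × List (List (String × String)))
    (seg : List (String × String)) :
    List (List (List (String × String))) × List (List (String × String)) :=
  let _speaker := (PySem.Dict.mk seg).get? "speaker"   -- speaker = segment['speaker'] (value unused)
  if pvIsAnalyst seg then
    if st.2.isEmpty then (st.1, [seg]) else (st.1 ++ [st.2], [seg])
  else
    if st.2.isEmpty then (st.1, [seg]) else (st.1, st.2 ++ [seg])

def group_qa_segments_py (segments : List (List (String × String))) : List (List (List (String × String))) :=
  if segments.isEmpty then []
  else
    let p := segments.foldl pvStepA ([], [])
    if p.2.isEmpty then p.1 else p.1 ++ [p.2]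

-- ===== PORT B =====
-- B's reversed loop: recursion from the right with state (groups, pending segments awaiting a leader)
def pvGoB (l : List (List (String × String))) :
    List (List (List (String × String))) × List (List (String × String)) :=
  match l with
  | [] => ([], [])
  | x :: xs =>
    let r := pvGoB xs
    let _speaker := (PySem.Dict.mk x).get? "speaker"   -- speaker, title unpack: the 'speaker' value is unused
    if pvIsAnalyst x then ((x :: r.2) :: r.1, []) else (r.1, x :: r.2)

def group_qa_segments_py_alt (segments : List (List (String × String))) : List (List (List (String × String))) :=
  let r := pvGoB segments
  if r.2.isEmpty then r.1 else r.2 :: r.1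

-- ===== PRECONDITION & SPEC =====
-- Pre_ excludes exactly the inputs on which both Pythons raise KeyError: a segment without
-- the 'speaker' key (each reads segment['speaker'] unconditionally).
def Pre_group_qa_segments_py (segments : List (List (String × String))) : Prop :=
  ∀ seg ∈ segments, ∃ p ∈ seg, p.1 = "speaker"
instance (segments : List (List (String × String))) : Decidable (Pre_group_qa_segments_py segments) := by unfold Pre_group_qa_segments_py; infer_instance

def pvWitness_group_qa_segments_py : (List (List (String × String))) :=
  [[("speaker", "John Doe"), ("title", "Analyst - Big Bank")], [("speaker", "Jane Roe"), ("title", "CEO")]]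

def Spec_group_qa_segments_py (segments : List (List (String × String))) (out : List (List (List (String × String)))) : Prop := out = group_qa_segments_py_alt segments
instance (segments : List (List (String × String))) (out : List (List (List (String × String)))) : Decidable (Spec_group_qa_segments_py segments out) := by unfold Spec_group_qa_segments_py; infer_instance

-- ===== CLAIM (what is proved, stated in full; the proofs are below) =====
def Claim_equal_group_qa_segments_py : Prop := ∀ (segments : List (List (String × String))), Dom_group_qa_segments_py segments → Pre_group_qa_segments_py segments → Spec_group_qa_segments_py segments (group_qa_segments_py segments)

-- ===== LEMMAS AND PROOFS =====

theorem pvGoB_nil : pvGoB [] = ([], []) := rfl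
theorem pvGoB_cons (x : List (String × String)) (xs : List (List (String × String))) :
    pvGoB (x :: xs) = if pvIsAnalyst x then ((x :: (pvGoB xs).2) :: (pvGoB xs).1, []) else ((pvGoB xs).1, x :: (pvGoB xs).2) := rfl

-- the invariant of A's fold: with a non-empty open group, finishing the fold and flushing the
-- open group yields the groups already closed, then the open group extended by the pending
-- leading segments of l, then B's completed groups of l.
theorem pvFoldA_eq (l : List (List (String × String)))
    (gs : List (List (List (String × String)))) (cur : List (List (String × String)))
    (hcur : cur.isEmpty = false) :
    (if (l.foldl pvStepA (gs, cur)).2.isEmpty then (l.foldl pvStepA (gs, cur)).1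
      else (l.foldl pvStepA (gs, cur)).1 ++ [(l.foldl pvStepA (gs, cur)).2]) =
      gs ++ (cur ++ (pvGoB l).2) :: (pvGoB l).1 := by
  induction l generalizing gs cur with
  | nil =>
    rw [pvGoB_nil]
    simp only [List.foldl_nil, hcur, Bool.false_eq_true, if_false, List.append_nil]
  | cons x xs ih =>
    rw [List.foldl_cons]
    by_cases hA : pvIsAnalyst x
    · have hstep : pvStepA (gs, cur) x = (gs ++ [cur], [x]) := by
        unfold pvStepA
        rw [hA, hcur]
        simp
      rw [hstep, ih (gs ++ [cur]) [x] (by simp)]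
      rw [pvGoB_cons, hA]
      simp
    · rw [Bool.not_eq_true] at hA
      have hstep : pvStepA (gs, cur) x = (gs, cur ++ [x]) := by
        unfold pvStepA
        rw [hA, hcur]
        simp
      rw [hstep, ih gs (cur ++ [x]) (by simp)]
      rw [pvGoB_cons, hA]
      simp

-- ===== VERDICT (by name: the statement is the Claim_ definition above) =====
theorem group_qa_segments_py_spec : Claim_equal_group_qa_segments_py := by
  intro segments _ _
  unfold Spec_group_qa_segments_py
  cases segments with
  | nil => rfl
  | cons s rest =>
    have hstep : pvStepA ([], []) s = ([], [s]) := by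
      unfold pvStepA
      cases pvIsAnalyst s <;> simp
    have h0 : group_qa_segments_py (s :: rest) =
        (if ((s :: rest).foldl pvStepA ([], [])).2.isEmpty then ((s :: rest).foldl pvStepA ([], [])).1
          else ((s :: rest).foldl pvStepA ([], [])).1 ++ [((s :: rest).foldl pvStepA ([], [])).2]) := rfl
    have h1 : group_qa_segments_py_alt (s :: rest) =
        (if (pvGoB (s :: rest)).2.isEmpty then (pvGoB (s :: rest)).1
          else (pvGoB (s :: rest)).2 :: (pvGoB (s :: rest)).1) := rfl
    rw [h0, h1, List.foldl_cons, hstep, pvFoldA_eq rest [] [s] rfl, pvGoB_cons]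
    cases pvIsAnalyst s <;> simp
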